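-- pv_equiv track=rewrite | github.com/MarcellaFeliciano/PEOO_python | lista8_py/02.py | codificador
-- ===== SOURCE A (Python) =====
-- def codificador(mensagem):
--     mens_cod = ''
--     for i in mensagem:
--         if i == 'a':
--             mens_cod +='$'
--         elif i == 'e':
--            mens_cod +='&'
--         elif i == 'i':
--             mens_cod +='!'
--         elif i == 'o':
--             mens_cod +='%'
--         elif i ==  'u':
--             mens_cod +='?'
--         else:
--             mens_cod+=i
--     return mens_cod
-- ===== SOURCE B (Python) =====
-- def codificador(mensagem):
--     return (mensagem
--             .replace('a', '$')
--             .replace('e', '&')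
--             .replace('i', '!')
--             .replace('o', '%')
--             .replace('u', '?'))
-- ===== Notes on version B (the rewrite author's own statement) =====
-- stated objective: faster
-- what changed: Replaces A's single character-by-character loop with five-way branching and string accumulation by five whole-string str.replace passes, one per vowel; correct because no substituted symbol is itself a vowel, so later passes never touch earlier substitutions.
import Mathlib
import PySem

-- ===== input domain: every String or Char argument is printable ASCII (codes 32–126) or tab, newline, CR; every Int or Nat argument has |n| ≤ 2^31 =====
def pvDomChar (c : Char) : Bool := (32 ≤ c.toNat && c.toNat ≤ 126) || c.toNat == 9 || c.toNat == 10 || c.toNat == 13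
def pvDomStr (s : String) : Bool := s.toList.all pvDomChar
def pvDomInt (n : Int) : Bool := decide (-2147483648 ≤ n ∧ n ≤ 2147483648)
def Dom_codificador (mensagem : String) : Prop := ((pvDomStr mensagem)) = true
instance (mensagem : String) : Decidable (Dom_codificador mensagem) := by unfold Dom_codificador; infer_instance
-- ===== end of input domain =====

-- B replaces A's single per-character loop (five-way if/elif with string accumulation)
-- by five whole-string replace passes, one per vowel; return-value equivalence.
-- ===== PORT A =====
def codificador (mensagem : String) : String :=
  mensagem.toList.foldl
    (fun mens_cod i =>
      if i = 'a' then mens_cod ++ "$"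
      else if i = 'e' then mens_cod ++ "&"
      else if i = 'i' then mens_cod ++ "!"
      else if i = 'o' then mens_cod ++ "%"
      else if i = 'u' then mens_cod ++ "?"
      else mens_cod ++ String.ofList [i]) ""

-- ===== PORT B =====
def codificador_alt (mensagem : String) : String :=
  PySem.Str.replace
    (PySem.Str.replace
      (PySem.Str.replace
        (PySem.Str.replace
          (PySem.Str.replace mensagem "a" "$") "e" "&") "i" "!") "o" "%") "u" "?"

-- ===== PRECONDITION & SPEC =====
def Spec_codificador (mensagem : String) (out : String) : Prop := out = codificador_alt mensagem
instance (mensagem : String) (out : String) : Decidable (Spec_codificador mensagem out) := by unfold Spec_codificador; infer_instance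

-- ===== CLAIM (what is proved, stated in full; the proofs are below) =====
def Claim_equal_codificador : Prop := ∀ (mensagem : String), Dom_codificador mensagem → Spec_codificador mensagem (codificador mensagem)

-- ===== LEMMAS AND PROOFS =====

-- single-character substitution as a per-character flatMap
def pvSub (v s : Char) (c : Char) : List Char := if c = v then [s] else [c]

-- the per-character encoding A performs
def pvEnc (c : Char) : List Char :=
  if c = 'a' then ['$']
  else if c = 'e' then ['&']
  else if c = 'i' then ['!']
  else if c = 'o' then ['%']
  else if c = 'u' then ['?'] else [c]

theorem replace_go_single (v s : Char) (fuel : Nat) (l acc : List Char)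
    (h : l.length ≤ fuel) :
    PySem.Chars.replace.go [v] [s] fuel l acc
      = acc.reverse ++ l.flatMap (pvSub v s) := by
  induction fuel generalizing l acc with
  | zero =>
    have : l = [] := List.length_eq_zero_iff.mp (Nat.le_zero.mp h)
    subst this
    simp [PySem.Chars.replace.go]
  | succ n ih =>
    cases l with
    | nil => simp [PySem.Chars.replace.go]
    | cons c t =>
      simp only [PySem.Chars.replace.go]
      by_cases hc : c = v
      · subst hc
        have hp : List.isPrefixOf [c] (c :: t) = true := by
          simp [List.isPrefixOf]
        rw [if_pos hp]
        simp only [List.length_cons] at h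
        simp only [List.length_cons, List.length_nil, Nat.zero_add, List.drop_one, List.tail_cons]
        rw [ih t _ (by omega)]
        simp [pvSub]
      · have hp : List.isPrefixOf [v] (c :: t) = false := by
          simp [List.isPrefixOf]
          exact fun hv => absurd hv.symm hc
        rw [if_neg (by simp [hp])]
        simp only [List.length_cons] at h
        rw [ih t _ (by omega)]
        simp [pvSub, hc]

theorem replace_single (v s : Char) (l : List Char) :
    PySem.Chars.replace l [v] [s] = l.flatMap (pvSub v s) := by
  unfold PySem.Chars.replace
  rw [if_neg (by simp)]
  rw [replace_go_single v s l.length l [] (le_refl _)]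
  simp

theorem codificador_alt_toList (m : String) :
    (codificador_alt m).toList = m.toList.flatMap pvEnc := by
  unfold codificador_alt
  simp only [PySem.Str.toList_replace]
  show PySem.Chars.replace (PySem.Chars.replace (PySem.Chars.replace (PySem.Chars.replace
      (PySem.Chars.replace m.toList ['a'] ['$']) ['e'] ['&']) ['i'] ['!']) ['o'] ['%']) ['u'] ['?']
      = _
  rw [replace_single, replace_single, replace_single, replace_single, replace_single]
  rw [List.flatMap_assoc, List.flatMap_assoc, List.flatMap_assoc, List.flatMap_assoc]
  apply List.flatMap_congr
  intro c _
  by_cases h1 : c = 'a'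
  · subst h1; simp [pvSub, pvEnc]
  · by_cases h2 : c = 'e'
    · subst h2; simp [pvSub, pvEnc]
    · by_cases h3 : c = 'i'
      · subst h3; simp [pvSub, pvEnc]
      · by_cases h4 : c = 'o'
        · subst h4; simp [pvSub, pvEnc]
        · by_cases h5 : c = 'u'
          · subst h5; simp [pvSub, pvEnc]
          · simp [pvSub, pvEnc, h1, h2, h3, h4, h5]

theorem codificador_foldl_toList (l : List Char) (acc : String) :
    (l.foldl
      (fun mens_cod i =>
        if i = 'a' then mens_cod ++ "$"
        else if i = 'e' then mens_cod ++ "&"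
        else if i = 'i' then mens_cod ++ "!"
        else if i = 'o' then mens_cod ++ "%"
        else if i = 'u' then mens_cod ++ "?"
        else mens_cod ++ String.ofList [i]) acc).toList
      = acc.toList ++ l.flatMap pvEnc := by
  induction l generalizing acc with
  | nil => simp
  | cons c t ih =>
    rw [List.foldl_cons, ih]
    by_cases h1 : c = 'a'
    · subst h1; simp [pvEnc]
    · by_cases h2 : c = 'e'
      · subst h2; simp [pvEnc]
      · by_cases h3 : c = 'i'
        · subst h3; simp [pvEnc]
        · by_cases h4 : c = 'o'
          · subst h4; simp [pvEnc]
          · by_cases h5 : c = 'u'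
            · subst h5; simp [pvEnc]
            · simp [pvEnc, h1, h2, h3, h4, h5]

-- ===== VERDICT (by name: the statement is the Claim_ definition above) =====
theorem codificador_spec : Claim_equal_codificador := by
  intro m _
  unfold Spec_codificador
  apply String.ext  -- equal toLists give equal strings
  rw [codificador_alt_toList]
  unfold codificador
  rw [codificador_foldl_toList]
  simp
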